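-- pv_equiv track=rewrite | github.com/IlumCI/HACF | knowledge.py | _split_code_content
-- ===== SOURCE A (Python) =====
-- from typing import List, Dict, Any, Optional
--
-- def _split_code_content(content: str, extension: str) -> List[str]:
--     """Split code content into logical chunks (functions, classes, etc.)"""
--     # Very basic implementation - in production this would use language-specific parsers
--     if extension in ['.py']:
--         # Simple Python function/class detection
--         lines = content.split('\n')
--         chunks = []
--         current_chunk = []
--
--         for line in lines:
--             if line.startswith('def ') or line.startswith('class '):
--                 if current_chunk:
--                     chunks.append('\n'.join(current_chunk))
--                 current_chunk = [line]
--             else: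
--                 current_chunk.append(line)
--
--         if current_chunk:
--             chunks.append('\n'.join(current_chunk))
--
--         return chunks
--
--     elif extension in ['.js', '.ts']:
--         # Simple JavaScript/TypeScript function detection
--         lines = content.split('\n')
--         chunks = []
--         current_chunk = []
--
--         for line in lines:
--             if 'function ' in line or '=>' in line or 'class ' in line:
--                 if current_chunk:
--                     chunks.append('\n'.join(current_chunk))
--                 current_chunk = [line]
--             else:
--                 current_chunk.append(line)
--
--         if current_chunk:
--             chunks.append('\n'.join(current_chunk))
--
--         return chunks
--
--     # For other languages, just return the whole content as one chunk
--     return [content]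
-- ===== SOURCE B (Python) =====
-- from typing import List
--
--
-- def _split_code_content(content: str, extension: str) -> List[str]:
--     """Split code content into logical chunks (functions, classes, etc.)"""
--     if extension == '.py':
--         def is_boundary(line):
--             return line.startswith('def ') or line.startswith('class ')
--     elif extension in ('.js', '.ts'):
--         def is_boundary(line):
--             return 'function ' in line or '=>' in line or 'class ' in line
--     else:
--         # For other languages, just return the whole content as one chunk
--         return [content]
--
--     lines = content.split('\n')
--     chunks = []
--     i = 0
--     n = len(lines)
--     while i < n:
--         # chunk starts at i; scan forward to the next boundary line (or the end)
--         j = i + 1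
--         while j < n and not is_boundary(lines[j]):
--             j += 1
--         chunks.append('\n'.join(lines[i:j]))
--         i = j
--     return chunks
-- ===== Notes on version B (the rewrite author's own statement) =====
-- stated objective: alternative
-- what changed: Replaced the accumulator loop (growing current_chunk, flushing it at each boundary line) by a two-pointer scan: each chunk is found by advancing a pointer to the next boundary line and slicing lines[i:j] directly.
import Mathlib
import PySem

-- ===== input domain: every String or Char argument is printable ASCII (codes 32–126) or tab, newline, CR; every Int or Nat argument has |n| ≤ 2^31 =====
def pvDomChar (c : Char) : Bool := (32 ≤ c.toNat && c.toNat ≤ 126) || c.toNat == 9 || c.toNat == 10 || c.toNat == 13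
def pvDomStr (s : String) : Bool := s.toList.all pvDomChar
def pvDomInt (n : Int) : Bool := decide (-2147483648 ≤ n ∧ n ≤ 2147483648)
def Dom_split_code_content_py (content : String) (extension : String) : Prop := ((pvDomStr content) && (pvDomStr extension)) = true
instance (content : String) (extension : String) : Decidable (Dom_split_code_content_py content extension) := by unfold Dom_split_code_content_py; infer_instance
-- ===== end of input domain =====

-- B replaces A's accumulator loop (grow current_chunk, flush at each boundary line) by a
-- two-pointer scan that finds each boundary and slices the chunk out directly; same cost,
-- alternative decomposition. Equivalence is proved on all inputs (A is total).

-- ===== PORT A =====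
-- boundary tests, inline in A's loop bodies
def pvABoundPy (line : String) : Bool :=
  PySem.Str.startswith line "def " || PySem.Str.startswith line "class "

def pvABoundJs (line : String) : Bool :=
  PySem.Str.isIn "function " line || PySem.Str.isIn "=>" line || PySem.Str.isIn "class " line

-- one iteration of A's 'for line in lines' loop; state = (chunks, current_chunk)
def pvAStep (p : String → Bool) (st : List String × List String) (line : String) :
    List String × List String :=
  if p line then
    (if st.2.isEmpty then st.1 else st.1 ++ [PySem.Str.join "\n" st.2], [line])
  else
    (st.1, st.2 ++ [line])

-- A's whole loop plus the trailing 'if current_chunk: chunks.append(...)'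
def pvALoop (p : String → Bool) (lines : List String) : List String :=
  let st := lines.foldl (pvAStep p) ([], [])
  if st.2.isEmpty then st.1 else st.1 ++ [PySem.Str.join "\n" st.2]

def split_code_content_py (content : String) (extension : String) : List String :=
  if [".py"].contains extension then
    pvALoop pvABoundPy ((PySem.Str.split? content "\n").getD [])
  else if [".js", ".ts"].contains extension then
    pvALoop pvABoundJs ((PySem.Str.split? content "\n").getD [])
  else
    [content]

-- ===== PORT B =====
def pvBBoundPy (line : String) : Bool :=
  PySem.Str.startswith line "def " || PySem.Str.startswith line "class "

def pvBBoundJs (line : String) : Bool :=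
  PySem.Str.isIn "function " line || PySem.Str.isIn "=>" line || PySem.Str.isIn "class " line

-- Source B's outer while loop: each step scans forward past the non-boundary lines following
-- lines[i] (the inner while = takeWhile/dropWhile) and emits the slice as one chunk.
def pvBChunks (p : String → Bool) : List String → List String
  | [] => []
  | l :: rest =>
    PySem.Str.join "\n" (l :: rest.takeWhile (fun x => !p x)) ::
      pvBChunks p (rest.dropWhile (fun x => !p x))
  termination_by lines => lines.length
  decreasing_by
    simp only [List.length_cons]
    exact Nat.lt_succ_of_le (List.length_dropWhile_le _ rest)

def split_code_content_py_alt (content : String) (extension : String) : List String :=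
  if extension == ".py" then
    pvBChunks pvBBoundPy ((PySem.Str.split? content "\n").getD [])
  else if extension == ".js" || extension == ".ts" then
    pvBChunks pvBBoundJs ((PySem.Str.split? content "\n").getD [])
  else
    [content]

-- ===== PRECONDITION & SPEC =====
def Spec_split_code_content_py (content : String) (extension : String) (out : List String) : Prop := out = split_code_content_py_alt content extension
instance (content : String) (extension : String) (out : List String) : Decidable (Spec_split_code_content_py content extension out) := by unfold Spec_split_code_content_py; infer_instance

-- ===== CLAIM (what is proved, stated in full; the proofs are below) =====
def Claim_equal_split_code_content_py : Prop := ∀ (content : String) (extension : String), Dom_split_code_content_py content extension → Spec_split_code_content_py content extension (split_code_content_py content extension)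

-- ===== LEMMAS AND PROOFS =====

-- equation lemmas for the well-founded definition pvBChunks
theorem pvBChunks_nil (p : String → Bool) : pvBChunks p [] = [] := by
  rw [pvBChunks]

theorem pvBChunks_cons (p : String → Bool) (l : String) (rest : List String) :
    pvBChunks p (l :: rest) =
      PySem.Str.join "\n" (l :: rest.takeWhile (fun x => !p x)) ::
        pvBChunks p (rest.dropWhile (fun x => !p x)) := by
  rw [pvBChunks]

-- the two ports' boundary tests are the same function
theorem pvBound_py_eq : pvABoundPy = pvBBoundPy := rfl
theorem pvBound_js_eq : pvABoundJs = pvBBoundJs := rfl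

-- Invariant of A's loop: with accumulated chunks `acc` and a NONEMPTY current chunk `cur`,
-- finishing the loop yields `acc`, then the chunk `cur` extended by the following
-- non-boundary lines, then B's chunking of the remainder.
theorem pvALoop_invariant (p : String → Bool) (lines : List String) :
    ∀ (acc cur : List String), cur ≠ [] →
    (let st := lines.foldl (pvAStep p) (acc, cur)
     if st.2.isEmpty then st.1 else st.1 ++ [PySem.Str.join "\n" st.2]) =
      acc ++ PySem.Str.join "\n" (cur ++ lines.takeWhile (fun x => !p x)) ::
        pvBChunks p (lines.dropWhile (fun x => !p x)) := by
  induction lines with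
  | nil =>
    intro acc cur hcur
    simp [List.isEmpty_iff, hcur, pvBChunks_nil]
  | cons x xs ih =>
    intro acc cur hcur
    by_cases hx : p x
    · have h1 : pvAStep p (acc, cur) x
          = (acc ++ [PySem.Str.join "\n" cur], [x]) := by
        simp [pvAStep, hx, List.isEmpty_iff, hcur]
      simp only [List.foldl_cons, h1, ih (acc ++ [PySem.Str.join "\n" cur]) [x] (by simp),
        List.takeWhile_cons, List.dropWhile_cons, hx]
      simp [pvBChunks_cons]
    · have h1 : pvAStep p (acc, cur) x = (acc, cur ++ [x]) := by
        simp [pvAStep, hx]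
      simp only [List.foldl_cons, h1, ih acc (cur ++ [x]) (by simp),
        List.takeWhile_cons, List.dropWhile_cons, hx]
      simp

theorem pvALoop_eq_pvBChunks (p : String → Bool) (lines : List String) :
    pvALoop p lines = pvBChunks p lines := by
  cases lines with
  | nil => simp [pvALoop, pvBChunks_nil]
  | cons l rest =>
    have hfirst : pvAStep p ([], []) l = ([], [l]) := by
      by_cases hl : p l <;> simp [pvAStep, hl]
    simp only [pvALoop, List.foldl_cons, hfirst]
    rw [pvALoop_invariant p rest [] [l] (by simp)]
    simp [pvBChunks_cons]

-- ===== VERDICT (by name: the statement is the Claim_ definition above) =====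
theorem split_code_content_py_spec : Claim_equal_split_code_content_py := by
  intro content extension _
  unfold Spec_split_code_content_py split_code_content_py split_code_content_py_alt
  have hpy : ([".py"].contains extension) = (extension == ".py") := by
    by_cases h : extension = ".py" <;> simp [h]
  have hjs : ([".js", ".ts"].contains extension)
      = (extension == ".js" || extension == ".ts") := by
    by_cases h : extension = ".js" <;> by_cases h' : extension = ".ts" <;> simp [h, h']
  rw [hpy, hjs, pvBound_py_eq, pvBound_js_eq,
    pvALoop_eq_pvBChunks, pvALoop_eq_pvBChunks]
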